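-- pv_equiv track=rewrite | github.com/wisoniamir/Genesis-FINAL-TRY | QUARANTINE_CLEANUP/backup_files/orphan_module_restructure_engine_fixed.py | add_eventbus_integration
-- ===== SOURCE A (Python) =====
-- def add_eventbus_integration(content: str) -> str:
--     """Add EventBus integration to module"""
--     # Add import at the top
--     lines = content.split('\n')
--     import_added = False
--
--     for i, line in enumerate(lines):
--         if line.startswith('import ') or line.startswith('from '):
--             if not import_added:
--                 lines.insert(i, 'from event_bus import EventBus')
--                 import_added = True
--                 break
--
--     if not import_added:
--         lines.insert(0, 'from event_bus import EventBus')
--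
--     # Add EventBus initialization to classes
--     enhanced_lines = []
--     for line in lines:
--         enhanced_lines.append(line)
--         if line.strip().startswith('def __init__(self'):
--             enhanced_lines.append('        self.event_bus = EventBus()')
--             enhanced_lines.append(
--                 '        self.event_bus.emit("module_initialized", '
--                 '{"module": self.__class__.__name__}, category="system")'
--             )
--
--     return '\n'.join(enhanced_lines)
-- ===== SOURCE B (Python) =====
-- def add_eventbus_integration(content: str) -> str:
--     """Add EventBus integration in a single pass over the lines."""
--     hdr = 'from event_bus import EventBus'
--     out = []
--     import_added = False
--     for line in content.split('\n'):
--         if (line.startswith('import ') or line.startswith('from ')) and not import_added: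
--             out.append(hdr)
--             import_added = True
--         out.append(line)
--         if line.strip().startswith('def __init__(self'):
--             out.append('        self.event_bus = EventBus()')
--             out.append(
--                 '        self.event_bus.emit("module_initialized", '
--                 '{"module": self.__class__.__name__}, category="system")'
--             )
--     if not import_added:
--         out.insert(0, hdr)
--     return '\n'.join(out)
-- ===== Notes on version B (the rewrite author's own statement) =====
-- stated objective: simpler
-- what changed: B fuses A's two sequential passes (search-and-insert the import, then re-scan appending __init__ lines) into a single pass with an import_added flag and a fallback prepend.
import Mathlib
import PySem

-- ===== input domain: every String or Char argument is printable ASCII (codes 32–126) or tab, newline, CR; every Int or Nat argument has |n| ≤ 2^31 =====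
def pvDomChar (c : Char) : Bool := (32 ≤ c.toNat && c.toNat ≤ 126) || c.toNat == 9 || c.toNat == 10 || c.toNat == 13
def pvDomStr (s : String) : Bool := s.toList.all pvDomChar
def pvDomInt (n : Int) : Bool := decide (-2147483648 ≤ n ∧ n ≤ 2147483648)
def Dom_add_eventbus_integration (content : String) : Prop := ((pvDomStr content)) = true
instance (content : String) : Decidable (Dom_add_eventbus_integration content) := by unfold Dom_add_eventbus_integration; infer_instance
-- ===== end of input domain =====

-- B fuses A's search-then-insert pass and enhancement pass into one pass with an import_added flag (objective: simpler, same cost).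

-- shared string literals and line tests (used verbatim by both Pythons)
def pvHdr : String := "from event_bus import EventBus"
def pvInit1 : String := "        self.event_bus = EventBus()"
def pvInit2 : String := "        self.event_bus.emit(\"module_initialized\", {\"module\": self.__class__.__name__}, category=\"system\")"
def pvIsImp (l : String) : Bool := PySem.Str.startswith l "import " || PySem.Str.startswith l "from "
def pvIsInit (l : String) : Bool := PySem.Str.startswith (PySem.Str.strip l) "def __init__(self"
-- content.split('\n'): exact via PySem.Chars.splitOn on the character list
def pvLines (content : String) : List String := (PySem.Chars.splitOn content.toList ['\n']).map String.ofList

-- ===== PORT A =====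
-- A's first loop: scan for the first import/from line, break there (some (prefix, rest)); none if no such line
def pvSplitAtImp : List String → Option (List String × List String)
  | [] => none
  | l :: rest =>
    if pvIsImp l then some ([], l :: rest)
    else (pvSplitAtImp rest).map (fun p => (l :: p.1, p.2))

def add_eventbus_integration (content : String) : String :=
  let lines := pvLines content
  let lines :=
    match pvSplitAtImp lines with
    | some (pre, suf) => pre ++ pvHdr :: suf        -- lines.insert(i, hdr); break
    | none => pvHdr :: lines                        -- lines.insert(0, hdr)
  let enhanced := lines.foldl (fun acc l =>
      let acc := acc ++ [l]
      if pvIsInit l then acc ++ [pvInit1, pvInit2] else acc) []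
  PySem.Str.join "\n" enhanced

-- ===== PORT B =====
def pvStep (st : List String × Bool) (l : String) : List String × Bool :=
  let out := if pvIsImp l && !st.2 then st.1 ++ [pvHdr] else st.1
  let added := st.2 || pvIsImp l
  let out := out ++ [l]
  let out := if pvIsInit l then out ++ [pvInit1, pvInit2] else out
  (out, added)

def add_eventbus_integration_alt (content : String) : String :=
  let st := (pvLines content).foldl pvStep ([], false)
  PySem.Str.join "\n" (if st.2 then st.1 else pvHdr :: st.1)

-- ===== PRECONDITION & SPEC =====
def Spec_add_eventbus_integration (content : String) (out : String) : Prop := out = add_eventbus_integration_alt content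
instance (content : String) (out : String) : Decidable (Spec_add_eventbus_integration content out) := by unfold Spec_add_eventbus_integration; infer_instance

-- ===== CLAIM (what is proved, stated in full; the proofs are below) =====
def Claim_equal_add_eventbus_integration : Prop := ∀ (content : String), Dom_add_eventbus_integration content → Spec_add_eventbus_integration content (add_eventbus_integration content)

-- ===== LEMMAS AND PROOFS =====

-- one enhanced block per line
def pvEnh (l : String) : List String := l :: (if pvIsInit l then [pvInit1, pvInit2] else [])

theorem pvEnh_hdr : pvEnh pvHdr = [pvHdr] := by decide

theorem pvAfold (lines : List String) (acc : List String) :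
    lines.foldl (fun acc l =>
      let acc := acc ++ [l]
      if pvIsInit l then acc ++ [pvInit1, pvInit2] else acc) acc
      = acc ++ lines.flatMap pvEnh := by
  induction lines generalizing acc with
  | nil => simp
  | cons l rest ih =>
    simp only [List.foldl_cons, ih, List.flatMap_cons, pvEnh]
    by_cases h : pvIsInit l = true <;> simp [h]

theorem pvBfold_true (lines : List String) (out : List String) :
    lines.foldl pvStep (out, true) = (out ++ lines.flatMap pvEnh, true) := by
  induction lines generalizing out with
  | nil => simp
  | cons l rest ih =>
    simp only [List.foldl_cons, pvStep, pvEnh, List.flatMap_cons]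
    by_cases h : pvIsInit l = true <;> simp [h, ih]

theorem pvBfold_false (lines : List String) (out : List String) :
    lines.foldl pvStep (out, false) =
      match pvSplitAtImp lines with
      | some (pre, suf) => (out ++ (pre ++ pvHdr :: suf).flatMap pvEnh, true)
      | none => (out ++ lines.flatMap pvEnh, false) := by
  induction lines generalizing out with
  | nil => simp [pvSplitAtImp]
  | cons l rest ih =>
    by_cases himp : pvIsImp l = true
    · have step : pvStep (out, false) l = (out ++ [pvHdr] ++ pvEnh l, true) := by
        simp only [pvStep, himp, pvEnh]
        by_cases h : pvIsInit l = true <;> simp [h]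
      simp only [List.foldl_cons, step, pvSplitAtImp, himp, if_true]
      rw [pvBfold_true]
      simp [pvEnh_hdr]
    · have step : pvStep (out, false) l = (out ++ pvEnh l, false) := by
        simp only [pvStep, himp, pvEnh]
        by_cases h : pvIsInit l = true <;> simp [h]
      simp only [List.foldl_cons, step, pvSplitAtImp, himp]
      rw [ih]
      cases hs : pvSplitAtImp rest with
      | none => simp
      | some p => cases p with
        | mk pre suf => simp

-- ===== VERDICT (by name: the statement is the Claim_ definition above) =====
theorem add_eventbus_integration_spec : Claim_equal_add_eventbus_integration := by
  intro content _
  unfold Spec_add_eventbus_integration add_eventbus_integration add_eventbus_integration_alt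
  simp only [pvBfold_false, pvAfold]
  cases hs : pvSplitAtImp (pvLines content) with
  | none => simp [pvEnh_hdr]
  | some p => cases p with
    | mk pre suf => simp
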